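-- pv_equiv track=rewrite | github.com/Quan064/Co_ganh | trainAI/Master.py | vay
-- ===== SOURCE A (Python) =====
-- def vay(opp_pos, your_board, opp_board):
--
--     for pos in opp_pos:
--         if (pos[0]+pos[1])%2==0:
--             move_list = ((1,0), (-1,0), (0,1), (0,-1), (1,1), (-1,-1), (-1,1), (1,-1))
--         else:
--             move_list = ((1,0), (-1,0), (0,1), (0,-1))
--         for move in move_list:
--             new_valid_x = pos[0] + move[0]
--             new_valid_y = pos[1] + move[1]
--             if 0<=new_valid_x<=4 and 0<=new_valid_y<=4 and (your_board|opp_board)&(1<<24-5*new_valid_y-new_valid_x) == 0: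
--                 return opp_board, opp_pos
--
--     return 0, []
-- ===== SOURCE B (Python) =====
-- def vay(opp_pos, your_board, opp_board):
--     opp = {tuple(p) for p in opp_pos}
--     board = your_board | opp_board
--     orth = ((1, 0), (-1, 0), (0, 1), (0, -1))
--     diag = ((1, 1), (-1, -1), (-1, 1), (1, -1))
--     for y in range(5):
--         for x in range(5):
--             if board & (1 << (24 - 5 * y - x)) != 0:
--                 continue
--             offs = orth + diag if (x + y) % 2 == 0 else orth
--             for dx, dy in offs:
--                 if (x - dx, y - dy) in opp:
--                     return opp_board, opp_pos
--     return 0, []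
-- ===== Notes on version B (the rewrite author's own statement) =====
-- stated objective: alternative
-- what changed: B inverts the search: instead of scanning each opponent piece over its move list, it scans the 25 board cells for an empty one, derives the diagonal-move rule from the target cell's parity, and looks the candidate attacker up in a set built once from opp_pos.
import Mathlib
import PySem

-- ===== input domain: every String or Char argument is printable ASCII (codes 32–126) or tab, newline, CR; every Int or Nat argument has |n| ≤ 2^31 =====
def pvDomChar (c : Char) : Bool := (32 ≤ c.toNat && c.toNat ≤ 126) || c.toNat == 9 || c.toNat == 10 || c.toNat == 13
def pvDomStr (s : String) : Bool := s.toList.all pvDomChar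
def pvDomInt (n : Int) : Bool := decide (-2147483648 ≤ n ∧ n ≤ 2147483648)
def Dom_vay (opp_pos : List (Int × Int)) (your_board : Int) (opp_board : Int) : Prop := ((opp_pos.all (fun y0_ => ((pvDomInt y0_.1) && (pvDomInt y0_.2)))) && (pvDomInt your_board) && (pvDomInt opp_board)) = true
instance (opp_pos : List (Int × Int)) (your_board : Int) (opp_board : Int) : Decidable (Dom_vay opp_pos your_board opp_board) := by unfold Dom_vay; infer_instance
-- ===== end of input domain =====

-- B scans the 25 board cells for an empty cell reachable by an opponent piece (set lookup),
-- instead of A's scan of opponent pieces over their move lists; objective: alternative decomposition.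

-- ===== PORT A =====
-- A's per-piece move list ('%' on Int with positive literal divisor 2 is exactly Python's '% 2').
def vayMoves (pos : Int × Int) : List (Int × Int) :=
  if (pos.1 + pos.2) % 2 = 0 then
    [(1,0), (-1,0), (0,1), (0,-1), (1,1), (-1,-1), (-1,1), (1,-1)]
  else
    [(1,0), (-1,0), (0,1), (0,-1)]

-- A's inner loop body: bounds test, then the empty-bit test; '.toNat' on the shift amount is
-- exact because whenever the bounds conjuncts hold, 24 - 5*ny - nx is in 0..24 (and when they
-- fail the whole conjunction is false regardless, matching Python's short-circuit).
def vayOk (board nx ny : Int) : Bool :=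
  decide (0 ≤ nx) && decide (nx ≤ 4) && decide (0 ≤ ny) && decide (ny ≤ 4) &&
    (PySem.Int.band board (((1 <<< (24 - 5 * ny - nx).toNat : Nat)) : Int) == 0)

-- the for-loops with constant 'return': found-flag over pieces, then over moves
def vay (opp_pos : List (Int × Int)) (your_board : Int) (opp_board : Int) : Int × (List (Int × Int)) :=
  if opp_pos.any (fun pos =>
      (vayMoves pos).any (fun move =>
        vayOk (PySem.Int.bor your_board opp_board) (pos.1 + move.1) (pos.2 + move.2))) then
    (opp_board, opp_pos)
  else
    (0, [])

-- ===== PORT B =====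
-- B's offsets allowed INTO cell (x,y): diagonals only when the cell parity is even.
def vayOffs (x y : Int) : List (Int × Int) :=
  if (x + y) % 2 = 0 then
    [(1,0), (-1,0), (0,1), (0,-1)] ++ [(1,1), (-1,-1), (-1,1), (1,-1)]
  else
    [(1,0), (-1,0), (0,1), (0,-1)]

def vay_alt (opp_pos : List (Int × Int)) (your_board : Int) (opp_board : Int) : Int × (List (Int × Int)) :=
  let opp : PySem.Set (Int × Int) := PySem.Set.ofList opp_pos
  let board := PySem.Int.bor your_board opp_board
  if (PySem.List.pyRange 0 5 1).any (fun y =>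
      (PySem.List.pyRange 0 5 1).any (fun x =>
        if PySem.Int.band board (((1 <<< (24 - 5 * y - x).toNat : Nat)) : Int) ≠ 0 then false
        else (vayOffs x y).any (fun m => PySem.Set.contains opp (x - m.1, y - m.2)))) then
    (opp_board, opp_pos)
  else
    (0, [])

-- ===== PRECONDITION & SPEC =====
def Spec_vay (opp_pos : List (Int × Int)) (your_board : Int) (opp_board : Int) (out : Int × (List (Int × Int))) : Prop := out = vay_alt opp_pos your_board opp_board
instance (opp_pos : List (Int × Int)) (your_board : Int) (opp_board : Int) (out : Int × (List (Int × Int))) : Decidable (Spec_vay opp_pos your_board opp_board out) := by unfold Spec_vay; infer_instance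

-- ===== CLAIM (what is proved, stated in full; the proofs are below) =====
def Claim_equal_vay : Prop := ∀ (opp_pos : List (Int × Int)) (your_board : Int) (opp_board : Int), Dom_vay opp_pos your_board opp_board → Spec_vay opp_pos your_board opp_board (vay opp_pos your_board opp_board)

-- ===== LEMMAS AND PROOFS =====

-- an offset is in A's list for the source piece iff it is in B's list for the target cell
lemma vay_move_iff (p m : Int × Int) :
    m ∈ vayMoves p ↔ m ∈ vayOffs (p.1 + m.1) (p.2 + m.2) := by
  unfold vayMoves vayOffs
  rcases p with ⟨a, b⟩
  rcases m with ⟨u, v⟩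
  simp only [List.cons_append, List.nil_append]
  split_ifs with h1 h2 h2 <;>
    simp_all only [List.mem_cons, List.not_mem_nil, or_false, Prod.mk.injEq] <;>
    omega

-- the two search conditions agree
lemma vay_cond_eq (xs : List (Int × Int)) (board : Int) :
    (xs.any (fun pos =>
      (vayMoves pos).any (fun move => vayOk board (pos.1 + move.1) (pos.2 + move.2)))) =
    ((PySem.List.pyRange 0 5 1).any (fun y =>
      (PySem.List.pyRange 0 5 1).any (fun x =>
        if PySem.Int.band board (((1 <<< (24 - 5 * y - x).toNat : Nat)) : Int) ≠ 0 then false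
        else (vayOffs x y).any (fun m =>
          PySem.Set.contains (PySem.Set.ofList xs) (x - m.1, y - m.2))))) := by
  rw [Bool.eq_iff_iff]
  simp only [List.any_eq_true, PySem.List.mem_pyRange_one]
  constructor
  · rintro ⟨p, hp, m, hm, hok⟩
    simp only [vayOk, Bool.and_eq_true, decide_eq_true_eq, beq_iff_eq] at hok
    obtain ⟨⟨⟨⟨h0x, h4x⟩, h0y⟩, h4y⟩, hbit⟩ := hok
    refine ⟨p.2 + m.2, by omega, p.1 + m.1, by omega, ?_⟩
    rw [if_neg (fun hc => hc hbit)]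
    simp only [List.any_eq_true]
    refine ⟨m, (vay_move_iff p m).mp hm, ?_⟩
    have he : (p.1 + m.1 - m.1, p.2 + m.2 - m.2) = p := by
      rw [add_sub_cancel_right, add_sub_cancel_right]
    rw [he, PySem.Set.contains_eq_listContains, List.contains_eq_mem, decide_eq_true_eq]
    exact (PySem.Set.mem_ofList xs p).mpr hp
  · rintro ⟨y, hy, x, hx, h⟩
    by_cases hbit : PySem.Int.band board (((1 <<< (24 - 5 * y - x).toNat : Nat)) : Int) = 0
    · rw [if_neg (fun hc => hc hbit)] at h
      simp only [List.any_eq_true] at h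
      obtain ⟨m, hm, hmem⟩ := h
      rw [PySem.Set.contains_eq_listContains, List.contains_eq_mem, decide_eq_true_eq,
        PySem.Set.mem_ofList xs] at hmem
      refine ⟨(x - m.1, y - m.2), hmem, m, ?_, ?_⟩
      · have h2 := (vay_move_iff (x - m.1, y - m.2) m).mpr
        simp only [sub_add_cancel] at h2
        exact h2 hm
      · simp only [vayOk, sub_add_cancel, Bool.and_eq_true, decide_eq_true_eq, beq_iff_eq]
        exact ⟨⟨⟨⟨by omega, by omega⟩, by omega⟩, by omega⟩, hbit⟩
    · rw [if_pos hbit] at h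
      exact absurd h (by simp)

-- ===== VERDICT (by name: the statement is the Claim_ definition above) =====
theorem vay_spec : Claim_equal_vay := by
  intro xs yb ob _
  unfold Spec_vay vay vay_alt
  rw [vay_cond_eq xs (PySem.Int.bor yb ob)]
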